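-- pv_equiv track=rewrite | github.com/relogu/photon | photon/utils.py | chunks_idx
-- ===== SOURCE A (Python) =====
-- from collections.abc import Generator, Sequence
-- from typing import Any, cast
--
-- def chunks_idx(
--     list_of_stuff: Sequence,
--     n_chunks: int,
-- ) -> Generator[tuple[int, int], Any, None]:
--     """Split a list in n_chunks of equal length.
--
--     Parameters
--     ----------
--     list_of_stuff : Sequence
--         The list to split.
--     n_chunks : int
--         The number of chunks to split the list into.
--
--     Yields
--     ------
--     Generator[tuple[int, int], Any, None]
--         A generator yielding the start and end indices of the chunks
--
--     """
--     d, r = divmod(len(list_of_stuff), n_chunks)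
--     for i in range(n_chunks):
--         si = (d + 1) * (min(r, i)) + d * (0 if i < r else i - r)
--         yield si, si + (d + 1 if i < r else d)
-- ===== SOURCE B (Python) =====
-- def chunks_idx(list_of_stuff, n_chunks):
--     """Yield (start, end) index pairs of n_chunks near-equal chunks,
--     threading a running start offset instead of recomputing each start."""
--     d, r = divmod(len(list_of_stuff), n_chunks)
--     start = 0
--     for i in range(n_chunks):
--         size = d + 1 if i < r else d
--         yield start, start + size
--         start += size
-- ===== Notes on version B (the rewrite author's own statement) =====
-- stated objective: simpler
-- what changed: B threads a running start offset through the loop instead of recomputing each chunk's start from A's min/branch closed-form expression.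
import Mathlib
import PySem

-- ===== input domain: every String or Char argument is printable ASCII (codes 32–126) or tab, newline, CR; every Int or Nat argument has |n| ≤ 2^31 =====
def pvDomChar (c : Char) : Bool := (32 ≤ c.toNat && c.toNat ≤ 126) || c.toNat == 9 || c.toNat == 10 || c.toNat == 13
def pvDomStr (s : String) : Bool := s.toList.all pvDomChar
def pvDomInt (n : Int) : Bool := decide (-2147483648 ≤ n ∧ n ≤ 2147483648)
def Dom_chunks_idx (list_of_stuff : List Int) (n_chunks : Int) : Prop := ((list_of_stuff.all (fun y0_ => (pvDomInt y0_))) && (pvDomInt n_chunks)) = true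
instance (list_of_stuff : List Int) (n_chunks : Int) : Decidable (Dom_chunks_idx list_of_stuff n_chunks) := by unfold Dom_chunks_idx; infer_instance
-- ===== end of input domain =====

-- B replaces A's min/branch closed-form start with a running start accumulator threaded through the loop (objective: simpler).


-- ===== PORT A =====
def chunks_idx (list_of_stuff : List Int) (n_chunks : Int) : List (Int × Int) :=
  match PySem.Int.divmod? (list_of_stuff.length : Int) n_chunks with
  | none => []   -- divmod by zero: excluded by Pre_
  | some (d, r) =>
    (PySem.List.pyRange 0 n_chunks 1).foldl (fun acc i =>
      let si := (d + 1) * (min r i) + d * (if i < r then 0 else i - r)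
      acc ++ [(si, si + (if i < r then d + 1 else d))]) []

-- ===== PORT B =====
def chunks_idx_alt (list_of_stuff : List Int) (n_chunks : Int) : List (Int × Int) :=
  match PySem.Int.divmod? (list_of_stuff.length : Int) n_chunks with
  | none => []   -- divmod by zero: excluded by Pre_
  | some (d, r) =>
    ((PySem.List.pyRange 0 n_chunks 1).foldl (fun st i =>
      let size := if i < r then d + 1 else d
      (st.1 ++ [(st.2, st.2 + size)], st.2 + size)) ([], 0)).1

-- ===== PRECONDITION & SPEC =====
-- Python A raises ZeroDivisionError exactly when n_chunks == 0 (the divmod call).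
def Pre_chunks_idx (list_of_stuff : List Int) (n_chunks : Int) : Prop := n_chunks ≠ 0
instance (list_of_stuff : List Int) (n_chunks : Int) : Decidable (Pre_chunks_idx list_of_stuff n_chunks) := by unfold Pre_chunks_idx; infer_instance
def pvWitness_chunks_idx : List Int × Int := ([1, 2, 3, 4, 5], 2)

def Spec_chunks_idx (list_of_stuff : List Int) (n_chunks : Int) (out : List (Int × Int)) : Prop := out = chunks_idx_alt list_of_stuff n_chunks
instance (list_of_stuff : List Int) (n_chunks : Int) (out : List (Int × Int)) : Decidable (Spec_chunks_idx list_of_stuff n_chunks out) := by unfold Spec_chunks_idx; infer_instance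

-- ===== CLAIM (what is proved, stated in full; the proofs are below) =====
def Claim_equal_chunks_idx : Prop := ∀ (list_of_stuff : List Int) (n_chunks : Int), Dom_chunks_idx list_of_stuff n_chunks → Pre_chunks_idx list_of_stuff n_chunks → Spec_chunks_idx list_of_stuff n_chunks (chunks_idx list_of_stuff n_chunks)

-- ===== LEMMAS AND PROOFS =====

-- A's closed-form start index for chunk i.
def pvStart (d r i : Int) : Int := (d + 1) * (min r i) + d * (if i < r then 0 else i - r)

lemma pvStart_succ (d r a : Int) (ha : 0 ≤ a) :
    pvStart d r (a + 1) = pvStart d r a + (if a < r then d + 1 else d) := by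
  unfold pvStart
  by_cases h : a < r
  · by_cases h1 : a + 1 < r
    · simp only [if_pos h, if_pos h1, min_eq_right h.le, min_eq_right h1.le]; ring
    · have hr : r = a + 1 := by omega
      subst hr
      simp only [if_pos h, if_neg h1, min_eq_right (by omega : a ≤ a + 1), min_self]; ring
  · simp only [if_neg h, if_neg (show ¬ a + 1 < r by omega),
      min_eq_left (by omega : r ≤ a), min_eq_left (by omega : r ≤ a + 1)]
    ring

-- Running-start fold (B) equals closed-form fold (A) over [a, a+m).
lemma pvFold_eq (d r : Int) (m : Nat) : ∀ (a s : Int), 0 ≤ a → s = pvStart d r a →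
    ∀ (acc : List (Int × Int)),
    (((List.range m).map (fun (k : Nat) => a + (k : Int))).foldl (fun st i =>
        let size := if i < r then d + 1 else d
        (st.1 ++ [(st.2, st.2 + size)], st.2 + size)) (acc, s)).1
    = ((List.range m).map (fun (k : Nat) => a + (k : Int))).foldl (fun acc i =>
        let si := (d + 1) * (min r i) + d * (if i < r then 0 else i - r)
        acc ++ [(si, si + (if i < r then d + 1 else d))]) acc := by
  induction m with
  | zero => intro a s _ _ acc; simp
  | succ m ih =>
    intro a s ha hs acc
    subst hs
    have hm : ((List.range (m + 1)).map (fun (k : Nat) => a + (k : Int)))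
        = a :: ((List.range m).map (fun (k : Nat) => (a + 1) + (k : Int))) := by
      rw [List.range_succ_eq_map, List.map_cons, List.map_map]
      refine congrArg₂ _ (by simp) ?_
      congr 1
      funext k
      simp only [Function.comp_apply, Nat.succ_eq_add_one]
      push_cast; ring
    rw [hm]
    simp only [List.foldl_cons]
    exact ih (a + 1) (pvStart d r a + (if a < r then d + 1 else d)) (by omega)
      (pvStart_succ d r a ha).symm
      (acc ++ [(pvStart d r a, pvStart d r a + (if a < r then d + 1 else d))])

-- ===== VERDICT (by name: the statement is the Claim_ definition above) =====
theorem chunks_idx_spec : Claim_equal_chunks_idx := by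
  intro xs n _ hn
  unfold Pre_chunks_idx at hn
  unfold Spec_chunks_idx chunks_idx chunks_idx_alt
  have hdm : PySem.Int.divmod? (xs.length : Int) n =
      some (PySem.Int.floordiv (xs.length : Int) n, PySem.Int.mod (xs.length : Int) n) := by
    simp [PySem.Int.divmod?, PySem.Int.floordiv, PySem.Int.mod, hn]
  rw [hdm]
  by_cases h0 : n ≤ 0
  · have : PySem.List.pyRange 0 n 1 = [] := by
      rw [PySem.List.pyRange_one]
      have : (n - 0).toNat = 0 := by omega
      rw [this]; simp
    simp [this]
  · have h0 : 0 < n := by omega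
    set d := PySem.Int.floordiv (xs.length : Int) n
    set r := PySem.Int.mod (xs.length : Int) n with hr
    have hr0 : (0 : Int) ≤ r := PySem.Int.mod_nonneg _ h0
    have hstart0 : (0 : Int) = pvStart d r 0 := by
      unfold pvStart
      rw [min_eq_right hr0]
      by_cases h : (0 : Int) < r
      · simp [h]
      · simp [h]; omega
    rw [PySem.List.pyRange_one]
    exact (pvFold_eq d r (n - 0).toNat 0 0 le_rfl hstart0 []).symm
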